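-- pv_equiv track=rewrite | github.com/mathysgrapotte/DC-theory | bin/manabase_karsten_analysis.py | count_mana_sources
-- ===== SOURCE A (Python) =====
-- def count_mana_sources(mana, deck_identity):
--     mana_sources = {}
--     land_count = 0
--     for c in deck_identity:
--         mana_sources[c] = 0
--
--     for m in mana:
--         if m == 'Undefined':
--             land_count+=1
--         elif m == "Not a mana source":
--             pass
--         else:
--             land_count+=1
--             for c in deck_identity:
--                 if c in m:
--                     mana_sources[c]+=1
--
--     return mana_sources, land_count
-- ===== SOURCE B (Python) =====
-- def count_mana_sources(mana, deck_identity):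
--     land_count = sum(1 for m in mana if m != 'Not a mana source')
--     mana_sources = {c: sum(1 for m in mana
--                            if m not in ('Undefined', 'Not a mana source') and c in m)
--                     for c in deck_identity}
--     return mana_sources, land_count
-- ===== Notes on version B (the rewrite author's own statement) =====
-- stated objective: simpler
-- what changed: The single fused mana-major loop mutating a dict is replaced by independent aggregations: one sum for land_count and a dict comprehension with one per-color scan of mana.
-- outside the precondition, e.g. on count_mana_sources(['W'], ['W', 'W']): A returns ({'W': 2}, 1), B returns ({'W': 1}, 1)
import Mathlib
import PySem

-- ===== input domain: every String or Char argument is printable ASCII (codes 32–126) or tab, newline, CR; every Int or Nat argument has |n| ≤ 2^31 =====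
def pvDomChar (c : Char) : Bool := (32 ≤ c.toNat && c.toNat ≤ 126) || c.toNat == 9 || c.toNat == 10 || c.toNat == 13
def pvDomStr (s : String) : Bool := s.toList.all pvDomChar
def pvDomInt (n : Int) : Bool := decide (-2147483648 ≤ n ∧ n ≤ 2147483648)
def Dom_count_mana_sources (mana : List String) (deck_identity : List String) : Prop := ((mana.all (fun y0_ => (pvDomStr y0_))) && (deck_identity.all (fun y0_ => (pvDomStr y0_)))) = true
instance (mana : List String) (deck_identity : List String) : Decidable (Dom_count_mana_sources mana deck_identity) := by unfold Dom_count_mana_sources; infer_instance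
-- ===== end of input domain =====

-- B replaces A's single fused mana-major loop (mutating a dict as it goes) by independent
-- aggregations: one count for land_count and one per-color scan of mana; objective: simpler.

-- ===== PORT A =====
def count_mana_sources (mana : List String) (deck_identity : List String) : (List (String × Int)) × Int :=
  let init : PySem.Dict String Int := deck_identity.foldl (fun d c => d.insert c 0) PySem.Dict.empty
  let st := mana.foldl (fun (st : PySem.Dict String Int × Int) m =>
      if m = "Undefined" then (st.1, st.2 + 1)
      else if m = "Not a mana source" then st
      else ((deck_identity.foldl (fun d c => if PySem.Str.isIn c m then d.modify c 0 (· + 1) else d) st.1),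
            st.2 + 1))
    (init, (0 : Int))
  (st.1.items, st.2)

-- ===== PORT B =====
def count_mana_sources_alt (mana : List String) (deck_identity : List String) : (List (String × Int)) × Int :=
  let land_count : Int := (mana.countP (fun m => m != "Not a mana source") : Int)
  let srcCount : String → Int := fun c =>
    (mana.countP (fun m => m != "Undefined" && m != "Not a mana source" && PySem.Str.isIn c m) : Int)
  let mana_sources : PySem.Dict String Int :=
    deck_identity.foldl (fun d c => d.insert c (srcCount c)) PySem.Dict.empty
  (mana_sources.items, land_count)

-- ===== PRECONDITION & SPEC =====
-- Pre_ excludes deck_identity lists with duplicate colors, on which A increments the shared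
-- dict entry once per duplicate occurrence (an accident of its fused loop) while B counts each
-- matching mana entry once; both values are defensible on that degenerate input.
def Pre_count_mana_sources (mana : List String) (deck_identity : List String) : Prop :=
  deck_identity.Nodup
instance (mana : List String) (deck_identity : List String) : Decidable (Pre_count_mana_sources mana deck_identity) := by unfold Pre_count_mana_sources; infer_instance

def pvWitness_count_mana_sources : List String × List String :=
  (["Forest", "Not a mana source", "Undefined"], ["G", "U"])

def Spec_count_mana_sources (mana : List String) (deck_identity : List String) (out : (List (String × Int)) × Int) : Prop := out = count_mana_sources_alt mana deck_identity
instance (mana : List String) (deck_identity : List String) (out : (List (String × Int)) × Int) : Decidable (Spec_count_mana_sources mana deck_identity out) := by unfold Spec_count_mana_sources; infer_instance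

-- ===== CLAIM (what is proved, stated in full; the proofs are below) =====
def Claim_equal_count_mana_sources : Prop := ∀ (mana : List String) (deck_identity : List String), Dom_count_mana_sources mana deck_identity → Pre_count_mana_sources mana deck_identity → Spec_count_mana_sources mana deck_identity (count_mana_sources mana deck_identity)

-- ===== LEMMAS AND PROOFS =====

lemma dict_items_ext (d1 d2 : PySem.Dict String Int) (hk : d1.keys = d2.keys)
    (hn : d1.keys.Nodup) (hg : ∀ k ∈ d1.keys, d1.get? k = d2.get? k) :
    d1.items = d2.items := by
  have hlen : d1.items.length = d2.items.length := by
    have := congrArg List.length hk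
    simpa [PySem.Dict.keys] using this
  apply List.ext_getElem hlen
  intro i h1 h2
  have hfst : (d1.items[i]).1 = (d2.items[i]).1 := by
    have := congrArg (fun l => l[i]?) hk
    simp [PySem.Dict.keys, h1, h2] at this
    exact this
  have hmem1 : d1.items[i] ∈ d1.items := List.getElem_mem h1
  have hmem2 : d2.items[i] ∈ d2.items := List.getElem_mem h2
  have hn2 : d2.keys.Nodup := hk ▸ hn
  have hkeymem : (d1.items[i]).1 ∈ d1.keys := by
    simp only [PySem.Dict.keys, List.mem_map]; exact ⟨_, hmem1, rfl⟩
  have e1 : d1.get? (d1.items[i]).1 = some (d1.items[i]).2 :=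
    PySem.Dict.get?_of_mem_items d1 (by exact hmem1) hn
  have e2 : d2.get? (d2.items[i]).1 = some (d2.items[i]).2 :=
    PySem.Dict.get?_of_mem_items d2 (by exact hmem2) hn2
  have := hg _ hkeymem
  rw [e1, hfst, e2] at this
  have hsnd : (d1.items[i]).2 = (d2.items[i]).2 := by simpa using this
  exact Prod.ext hfst hsnd

lemma get?_eq_some_getD_of_contains (d : PySem.Dict String Int) (k : String)
    (h : d.contains k = true) : d.get? k = some (d.getD k 0) := by
  rw [PySem.Dict.contains_eq_isSome_get?] at h
  rw [PySem.Dict.getD_eq_get?_getD]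
  cases hg : d.get? k with
  | none => rw [hg] at h; simp at h
  | some v => simp

lemma innerA (m : String) : ∀ (deck : List String) (d : PySem.Dict String Int),
    deck.Nodup → (∀ c ∈ deck, d.contains c = true) →
    (deck.foldl (fun d c => if PySem.Str.isIn c m then d.modify c 0 (· + 1) else d) d).keys = d.keys ∧
    ∀ k, (deck.foldl (fun d c => if PySem.Str.isIn c m then d.modify c 0 (· + 1) else d) d).getD k 0
          = d.getD k 0 + (if k ∈ deck ∧ PySem.Str.isIn k m then 1 else 0) := by
  intro deck
  induction deck with
  | nil => intro d _ _; simp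
  | cons c rest ih =>
    intro d hn hc
    have hcd : d.contains c = true := hc c (by simp)
    have hk1 : (if PySem.Str.isIn c m then d.modify c 0 (· + 1) else d).keys = d.keys := by
      by_cases hin : PySem.Str.isIn c m
      · rw [if_pos hin, PySem.Dict.keys_modify, PySem.Dict.keys_insert_of_contains _ _ hcd]
      · rw [if_neg hin]
    have hc1 : ∀ c' ∈ rest, (if PySem.Str.isIn c m then d.modify c 0 (· + 1) else d).contains c' = true := by
      intro c' hmem
      rw [PySem.Dict.contains_eq_decide_mem_keys, hk1, ← PySem.Dict.contains_eq_decide_mem_keys]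
      exact hc c' (by simp [hmem])
    obtain ⟨ihk, ihg⟩ := ih (if PySem.Str.isIn c m then d.modify c 0 (· + 1) else d) hn.of_cons hc1
    constructor
    · rw [List.foldl_cons, ihk, hk1]
    · intro k
      rw [List.foldl_cons, ihg k]
      have hstep : (if PySem.Str.isIn c m then d.modify c 0 (· + 1) else d).getD k 0
          = d.getD k 0 + (if k = c ∧ PySem.Str.isIn k m then 1 else 0) := by
        by_cases hkc : k = c
        · subst hkc
          by_cases hin : PySem.Str.isIn k m
          · rw [if_pos hin, PySem.Dict.getD_modify, if_pos rfl, if_pos ⟨rfl, hin⟩]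
          · rw [if_neg hin, if_neg (fun h => hin h.2), add_zero]
        · by_cases hin : PySem.Str.isIn c m
          · rw [if_pos hin, PySem.Dict.getD_modify, if_neg hkc, if_neg (fun h => hkc h.1), add_zero]
          · rw [if_neg hin, if_neg (fun h => hkc h.1), add_zero]
      rw [hstep]
      have hcnr : c ∉ rest := (List.nodup_cons.mp hn).1
      by_cases hin : PySem.Str.isIn k m
      · by_cases hkc : k = c
        · subst hkc
          rw [if_pos (show k = k ∧ PySem.Str.isIn k m = true from ⟨rfl, hin⟩), if_neg (fun h : k ∈ rest ∧ PySem.Str.isIn k m = true => hcnr h.1), if_pos ⟨List.mem_cons_self, hin⟩]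
          ring
        · rw [if_neg (fun h => hkc h.1), add_zero]
          by_cases hr : k ∈ rest
          · rw [if_pos ⟨hr, hin⟩, if_pos ⟨List.mem_cons_of_mem _ hr, hin⟩]
          · rw [if_neg (fun h => hr h.1), if_neg (fun h => by
              rcases List.mem_cons.mp h.1 with h' | h'
              · exact hkc h'
              · exact hr h')]
      · rw [if_neg (fun h => hin h.2), if_neg (fun h => hin h.2), if_neg (fun h => hin h.2)]
        ring

lemma outerA (deck : List String) (hn : deck.Nodup) : ∀ (mana : List String)
    (d : PySem.Dict String Int) (n : Int), (∀ c ∈ deck, d.contains c = true) →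
    (mana.foldl (fun (st : PySem.Dict String Int × Int) m =>
      if m = "Undefined" then (st.1, st.2 + 1)
      else if m = "Not a mana source" then st
      else ((deck.foldl (fun d c => if PySem.Str.isIn c m then d.modify c 0 (· + 1) else d) st.1),
            st.2 + 1)) (d, n)).1.keys = d.keys ∧
    (mana.foldl (fun (st : PySem.Dict String Int × Int) m =>
      if m = "Undefined" then (st.1, st.2 + 1)
      else if m = "Not a mana source" then st
      else ((deck.foldl (fun d c => if PySem.Str.isIn c m then d.modify c 0 (· + 1) else d) st.1),
            st.2 + 1)) (d, n)).2 = n + (mana.countP (fun m => m != "Not a mana source") : Int) ∧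
    ∀ k, (mana.foldl (fun (st : PySem.Dict String Int × Int) m =>
      if m = "Undefined" then (st.1, st.2 + 1)
      else if m = "Not a mana source" then st
      else ((deck.foldl (fun d c => if PySem.Str.isIn c m then d.modify c 0 (· + 1) else d) st.1),
            st.2 + 1)) (d, n)).1.getD k 0
        = d.getD k 0 + (if k ∈ deck then (mana.countP (fun m => m != "Undefined" && m != "Not a mana source" && PySem.Str.isIn k m) : Int) else 0) := by
  intro mana
  induction mana with
  | nil => intro d n _; simp
  | cons m rest ih =>
    intro d n hc
    by_cases hu : m = "Undefined"
    · subst hu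
      rw [List.foldl_cons, if_pos rfl]
      obtain ⟨k1, k2, k3⟩ := ih d (n + 1) hc
      refine ⟨k1, ?_, ?_⟩
      · rw [k2, List.countP_cons]
        simp
        ring
      · intro k
        rw [k3 k, List.countP_cons]
        simp
    · by_cases hns : m = "Not a mana source"
      · subst hns
        rw [List.foldl_cons, if_neg hu, if_pos rfl]
        obtain ⟨k1, k2, k3⟩ := ih d n hc
        refine ⟨k1, ?_, ?_⟩
        · rw [k2, List.countP_cons]; simp
        · intro k
          rw [k3 k, List.countP_cons]
          simp
      · rw [List.foldl_cons, if_neg hu, if_neg hns]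
        obtain ⟨hik, hig⟩ := innerA m deck d hn hc
        have hc' : ∀ c ∈ deck, (deck.foldl (fun d c => if PySem.Str.isIn c m then d.modify c 0 (· + 1) else d) d).contains c = true := by
          intro c hmem
          rw [PySem.Dict.contains_eq_decide_mem_keys, hik, ← PySem.Dict.contains_eq_decide_mem_keys]
          exact hc c hmem
        obtain ⟨k1, k2, k3⟩ := ih _ (n + 1) hc'
        refine ⟨k1.trans hik, ?_, ?_⟩
        · rw [k2, List.countP_cons]
          simp [bne_iff_ne, hns]
          ring
        · intro k
          rw [k3 k, hig k, List.countP_cons]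
          by_cases hmem : k ∈ deck
          · simp [bne_iff_ne, hu, hns, hmem]
            ring
          · simp [bne_iff_ne, hmem]

lemma count_eq_alt_of_nodup (mana deck : List String) (hpre : deck.Nodup) :
    count_mana_sources mana deck = count_mana_sources_alt mana deck := by
  unfold count_mana_sources count_mana_sources_alt
  have hinit : (deck.foldl (fun d c => d.insert c (0 : Int)) PySem.Dict.empty).items
      = deck.map (fun c => (c, (0 : Int))) := by
    have := PySem.Dict.items_foldl_insert_fresh deck (fun c => c) (fun _ => (0 : Int)) PySem.Dict.empty
      (fun a _ => PySem.Dict.contains_empty a) (by simpa using hpre)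
    simpa using this
  have hinitkeys : (deck.foldl (fun d c => d.insert c (0 : Int)) PySem.Dict.empty).keys = deck := by
    simp only [PySem.Dict.keys]; simp only [hinit, List.map_map]; exact List.map_id deck
  have hinitnodup : (deck.foldl (fun d c => d.insert c (0 : Int)) PySem.Dict.empty).keys.Nodup := by
    rw [hinitkeys]; exact hpre
  have hinitc : ∀ c ∈ deck, (deck.foldl (fun d c => d.insert c (0 : Int)) PySem.Dict.empty).contains c = true := by
    intro c hmem
    rw [PySem.Dict.contains_eq_decide_mem_keys, hinitkeys]
    simpa using hmem
  have hinitg : ∀ k ∈ deck, (deck.foldl (fun d c => d.insert c (0 : Int)) PySem.Dict.empty).getD k (0 : Int) = 0 := by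
    intro k hmem
    exact PySem.Dict.getD_of_mem_items _ (by simp only [hinit]; exact List.mem_map_of_mem hmem) hinitnodup 0
  obtain ⟨hak, hal, hag⟩ := outerA deck hpre mana (deck.foldl (fun d c => d.insert c (0 : Int)) PySem.Dict.empty) 0 hinitc
  have hbitems : (deck.foldl (fun d c => d.insert c
        ((mana.countP (fun m => m != "Undefined" && m != "Not a mana source" && PySem.Str.isIn c m) : Int)))
      PySem.Dict.empty).items
      = deck.map (fun c => (c, (mana.countP (fun m => m != "Undefined" && m != "Not a mana source" && PySem.Str.isIn c m) : Int))) := by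
    have := PySem.Dict.items_foldl_insert_fresh deck (fun c => c)
      (fun c => (mana.countP (fun m => m != "Undefined" && m != "Not a mana source" && PySem.Str.isIn c m) : Int))
      PySem.Dict.empty (fun a _ => PySem.Dict.contains_empty a) (by simpa using hpre)
    simpa using this
  have hbkeys : (deck.foldl (fun d c => d.insert c
        ((mana.countP (fun m => m != "Undefined" && m != "Not a mana source" && PySem.Str.isIn c m) : Int)))
      PySem.Dict.empty).keys = deck := by
    simp only [PySem.Dict.keys]; simp only [hbitems, List.map_map]; exact List.map_id deck
  refine Prod.ext ?_ (by simpa using hal)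
  apply dict_items_ext
  · rw [hak, hinitkeys, hbkeys]
  · rw [hak]; exact hinitnodup
  · intro k hk
    rw [hak, hinitkeys] at hk
    have hca : (mana.foldl (fun (st : PySem.Dict String Int × Int) m =>
      if m = "Undefined" then (st.1, st.2 + 1)
      else if m = "Not a mana source" then st
      else ((deck.foldl (fun d c => if PySem.Str.isIn c m then d.modify c 0 (· + 1) else d) st.1),
            st.2 + 1)) (deck.foldl (fun d c => d.insert c (0 : Int)) PySem.Dict.empty, (0:Int))).1.contains k = true := by
      rw [PySem.Dict.contains_eq_decide_mem_keys, hak, hinitkeys]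
      simpa using hk
    rw [get?_eq_some_getD_of_contains _ _ hca, hag k, hinitg k hk, if_pos hk, zero_add]
    exact (PySem.Dict.get?_of_mem_items _ (by simp only [hbitems]; exact List.mem_map_of_mem hk)
      (by rw [hbkeys]; exact hpre)).symm

-- ===== VERDICT (by name: the statement is the Claim_ definition above) =====
theorem count_mana_sources_spec : Claim_equal_count_mana_sources := by
  intro mana deck _ hpre
  unfold Spec_count_mana_sources
  exact count_eq_alt_of_nodup mana deck hpre
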